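-- pv_equiv track=rewrite | github.com/orarioni/keepa_monthlySold | app/asr/dedupe.py | merge_with_recent
-- ===== SOURCE A (Python) =====
-- def merge_with_recent(recent_text: str, new_text: str, max_overlap: int = 40) -> str:
--     a = recent_text.strip()
--     b = new_text.strip()
--     if not b:
--         return ""
--     if not a:
--         return b
--
--     max_k = min(len(a), len(b), max_overlap)
--     overlap = 0
--     for k in range(max_k, 0, -1):
--         if a.endswith(b[:k]):
--             overlap = k
--             break
--     return b[overlap:].strip()
-- ===== SOURCE B (Python) =====
-- def merge_with_recent(recent_text: str, new_text: str, max_overlap: int = 40) -> str: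
--     a, b = recent_text.strip(), new_text.strip()
--     if not (a and b):
--         return b
--     max_k = min(len(a), len(b), max_overlap)
--     # Rolling fingerprints of a's k-suffix and b's k-prefix (same little-endian
--     # convention); a candidate k is accepted only after the slices are verified,
--     # so a fingerprint collision can never produce a wrong answer.
--     BASE = 1 << 21
--     MOD = (1 << 61) - 1
--     n = len(a)
--     ha = 0   # fingerprint of a[n-k:]  (char at the cut is least significant)
--     hb = 0   # fingerprint of b[:k]
--     pw = 1   # BASE ** k  (mod MOD)
--     overlap = 0
--     for k in range(1, max_k + 1):
--         ha = (ord(a[n - k]) + BASE * ha) % MOD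
--         hb = (hb + ord(b[k - 1]) * pw) % MOD
--         pw = pw * BASE % MOD
--         if ha == hb and a[n - k:] == b[:k]:
--             overlap = k
--     return b[overlap:].strip()
-- ===== Notes on version B (the rewrite author's own statement) =====
-- stated objective: alternative
-- what changed: Replaces A's descending scan that calls endswith on a fresh slice b[:k] for every candidate k with a single ascending pass that maintains rolling fingerprints of a's k-suffix and b's k-prefix, verifying the slices only when the fingerprints collide and keeping the largest verified k.
import Mathlib
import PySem

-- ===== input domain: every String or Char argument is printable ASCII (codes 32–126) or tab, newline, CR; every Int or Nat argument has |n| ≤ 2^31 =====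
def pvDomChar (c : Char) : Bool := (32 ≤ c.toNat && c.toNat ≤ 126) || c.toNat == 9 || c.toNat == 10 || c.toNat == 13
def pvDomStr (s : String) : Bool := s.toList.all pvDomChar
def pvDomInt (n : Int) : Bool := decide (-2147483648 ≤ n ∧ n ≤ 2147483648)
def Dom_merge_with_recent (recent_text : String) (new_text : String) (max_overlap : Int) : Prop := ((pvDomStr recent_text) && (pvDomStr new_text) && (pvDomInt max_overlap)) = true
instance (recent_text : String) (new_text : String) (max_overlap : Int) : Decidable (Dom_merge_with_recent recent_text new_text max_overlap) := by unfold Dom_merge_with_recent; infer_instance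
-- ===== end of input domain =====

-- B replaces A's descending endswith scan by one ascending pass maintaining rolling
-- fingerprints of a's k-suffix and b's k-prefix, comparing the slices only when the
-- fingerprints collide and keeping the largest verified k; objective: alternative.

-- ===== PORT A =====
-- 'for k in range(max_k, 0, -1): if a.endswith(b[:k]): overlap = k; break' (break = first match)
def pvFindOv_A (a b : String) : List Int → Int
  | [] => 0
  | k :: ks =>
    if PySem.Str.endswith a (PySem.Str.slice b none (some k)) then k else pvFindOv_A a b ks

def merge_with_recent (recent_text : String) (new_text : String) (max_overlap : Int) : String :=
  let a := PySem.Str.strip recent_text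
  let b := PySem.Str.strip new_text
  if b = "" then ""
  else if a = "" then b
  else
    let max_k := min (min (PySem.Str.len a) (PySem.Str.len b)) max_overlap
    let overlap := pvFindOv_A a b (PySem.List.pyRange max_k 0 (-1))
    PySem.Str.strip (PySem.Str.slice b (some overlap) none)

-- ===== PORT B =====
-- loop body of Source B; state (ha, hb, pw, overlap).  ord(a[n-k]) / ord(b[k-1]) are always in
-- range here (1 ≤ k ≤ max_k ≤ len a, len b), so the Option default 0 is never used.
def pvStepB (a b : String) (n : Int) (st : Int × Int × Int × Int) (k : Int) :
    Int × Int × Int × Int :=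
  let ha := ((PySem.Str.pyGet? a (n - k)).elim 0 (fun c => (c.toNat : Int)) + 2097152 * st.1)
      % 2305843009213693951
  let hb := (st.2.1 + (PySem.Str.pyGet? b (k - 1)).elim 0 (fun c => (c.toNat : Int)) * st.2.2.1)
      % 2305843009213693951
  let pw := st.2.2.1 * 2097152 % 2305843009213693951
  let ov := if ha = hb ∧ PySem.Str.slice a (some (n - k)) none = PySem.Str.slice b none (some k)
      then k else st.2.2.2
  (ha, hb, pw, ov)

def merge_with_recent_alt (recent_text : String) (new_text : String) (max_overlap : Int) : String :=
  let a := PySem.Str.strip recent_text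
  let b := PySem.Str.strip new_text
  if a = "" ∨ b = "" then b
  else
    let max_k := min (min (PySem.Str.len a) (PySem.Str.len b)) max_overlap
    let n := PySem.Str.len a
    let st := (PySem.List.pyRange 1 (max_k + 1) 1).foldl (pvStepB a b n) (0, 0, 1, 0)
    PySem.Str.strip (PySem.Str.slice b (some st.2.2.2) none)

-- ===== PRECONDITION & SPEC =====
def Spec_merge_with_recent (recent_text : String) (new_text : String) (max_overlap : Int) (out : String) : Prop := out = merge_with_recent_alt recent_text new_text max_overlap
instance (recent_text : String) (new_text : String) (max_overlap : Int) (out : String) : Decidable (Spec_merge_with_recent recent_text new_text max_overlap out) := by unfold Spec_merge_with_recent; infer_instance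

-- ===== CLAIM (what is proved, stated in full; the proofs are below) =====
def Claim_equal_merge_with_recent : Prop := ∀ (recent_text : String) (new_text : String) (max_overlap : Int), Dom_merge_with_recent recent_text new_text max_overlap → Spec_merge_with_recent recent_text new_text max_overlap (merge_with_recent recent_text new_text max_overlap)

-- ===== LEMMAS AND PROOFS =====

/-- Exact little-endian fingerprint in base 2^21 (> every `Char.toNat`). -/
def pvEncode : List Char → Int
  | [] => 0
  | c :: s => (c.toNat : Int) + 2097152 * pvEncode s

/-- Reference value of the overlap search: largest k ≤ bound with b-prefix = a-suffix. -/
def pvF (al bl : List Char) : Nat → Int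
  | 0 => 0
  | k + 1 =>
    if bl.take (k + 1) = al.drop (al.length - (k + 1)) then ((k : Int) + 1) else pvF al bl k

def pvEncodeM : List Char → Int
  | [] => 0
  | c :: s => ((c.toNat : Int) + 2097152 * pvEncodeM s) % 2305843009213693951

theorem pvModEq_self (x M : Int) : x % M ≡ x [ZMOD M] := Int.emod_emod_of_dvd x dvd_rfl

theorem pvEncodeM_eq (s : List Char) :
    pvEncodeM s = pvEncode s % 2305843009213693951 := by
  induction s with
  | nil => simp [pvEncodeM, pvEncode]
  | cons c s ih =>
    show ((c.toNat : Int) + 2097152 * pvEncodeM s) % 2305843009213693951 = _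
    rw [ih]
    exact (Int.ModEq.refl _).add ((Int.ModEq.refl 2097152).mul (pvModEq_self _ _))

theorem pvEncode_append_singleton (s : List Char) (c : Char) :
    pvEncode (s ++ [c]) = pvEncode s + (c.toNat : Int) * 2097152 ^ s.length := by
  induction s with
  | nil => simp [pvEncode]
  | cons d s ih => simp only [List.cons_append, pvEncode, ih, List.length_cons]; ring

/-- A's loop over range(k, 0, -1) computes the reference value. -/
theorem pvA_loop (a b : String) (k : Nat) (hn : k ≤ a.toList.length)
    (hm : k ≤ b.toList.length) :
    pvFindOv_A a b (PySem.List.pyRange (k : Int) 0 (-1)) = pvF a.toList b.toList k := by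
  induction k with
  | zero =>
    rw [PySem.List.pyRange_neg_one_eq_nil (by omega)]
    simp [pvFindOv_A, pvF]
  | succ k ih =>
    rw [show ((k + 1 : Nat) : Int) = (k : Int) + 1 by push_cast; ring,
        PySem.List.pyRange_neg_one_cons (by omega),
        show (k : Int) + 1 - 1 = (k : Int) by ring]
    have hiffA : (b.toList.take (k + 1)).isSuffixOf a.toList = true
        ↔ b.toList.take (k + 1) = a.toList.drop (a.toList.length - (k + 1)) := by
      rw [List.isSuffixOf_iff_suffix, List.suffix_iff_eq_drop]
      have hlen : (b.toList.take (k + 1)).length = k + 1 := by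
        rw [List.length_take]; omega
      rw [hlen]
    have hcond : PySem.Str.endswith a (PySem.Str.slice b none (some ((k : Int) + 1)))
        = decide (b.toList.take (k + 1) = a.toList.drop (a.toList.length - (k + 1))) := by
      have hsl : PySem.Str.slice b none (some ((k : Int) + 1))
          = String.ofList (b.toList.take (k + 1)) := by
        rw [PySem.Str.slice, show ((k : Int) + 1) = ((k + 1 : Nat) : Int) by push_cast; ring]
        rw [PySem.Chars.slice, PySem.List.slice_to_natCast]
      rw [hsl, PySem.Str.endswith, PySem.Chars.endswith, String.toList_ofList]
      cases hE : (b.toList.take (k + 1)).isSuffixOf a.toList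
      · symm
        simp only [decide_eq_false_iff_not]
        intro hp
        exact absurd (hiffA.mpr hp) (by simp [hE])
      · symm
        simp only [decide_eq_true_eq]
        exact hiffA.mp hE
    simp only [pvFindOv_A]
    rw [hcond]
    by_cases hc : b.toList.take (k + 1) = a.toList.drop (a.toList.length - (k + 1))
    · rw [if_pos (decide_eq_true hc), pvF, if_pos hc]
    · rw [if_neg (fun h => hc (of_decide_eq_true h)), pvF, if_neg hc, ih (by omega) (by omega)]

/-- B's fold over range(1, k+1) maintains the rolling fingerprints of the current
    suffix/prefix, the running power, and the reference overlap value. -/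
theorem pvB_loop (a b : String) (k : Nat) (hn : k ≤ a.toList.length)
    (hm : k ≤ b.toList.length) :
    (PySem.List.pyRange 1 ((k : Int) + 1) 1).foldl
        (pvStepB a b (PySem.Str.len a)) (0, 0, 1, 0)
      = (pvEncodeM (a.toList.drop (a.toList.length - k)),
         pvEncode (b.toList.take k) % 2305843009213693951,
         2097152 ^ k % 2305843009213693951, pvF a.toList b.toList k) := by
  induction k with
  | zero =>
    rw [show ((0 : Nat) : Int) + 1 = 1 by ring, PySem.List.pyRange_one_eq_nil (by omega)]
    rw [show a.toList.length - 0 = a.toList.length from rfl, List.drop_length]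
    simp [pvEncodeM, pvEncode, pvF]
  | succ k ih =>
    rw [show ((k + 1 : Nat) : Int) + 1 = ((k : Int) + 1) + 1 by push_cast; ring,
        PySem.List.pyRange_one_succ_right (by omega), List.foldl_append,
        ih (by omega) (by omega)]
    have hga : PySem.Str.pyGet? a (PySem.Str.len a - ((k : Int) + 1))
        = some (a.toList[a.toList.length - (k + 1)]'(by omega)) := by
      simp only [PySem.Str.pyGet?, PySem.Chars.pyGet?, PySem.Str.len_eq]
      rw [show ((a.toList.length : Int)) - ((k : Int) + 1)
            = ((a.toList.length - (k + 1) : Nat) : Int) by omega]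
      rw [PySem.List.pyGet?_natCast]
      exact List.getElem?_eq_getElem (by omega)
    have hgb : PySem.Str.pyGet? b ((k : Int) + 1 - 1) = some (b.toList[k]'(by omega)) := by
      simp only [PySem.Str.pyGet?, PySem.Chars.pyGet?]
      rw [show (k : Int) + 1 - 1 = ((k : Nat) : Int) by omega,
          PySem.List.pyGet?_natCast]
      exact List.getElem?_eq_getElem (by omega)
    have hdrop : a.toList.drop (a.toList.length - (k + 1))
        = (a.toList[a.toList.length - (k + 1)]'(by omega))
            :: a.toList.drop (a.toList.length - k) := by
      rw [List.drop_eq_getElem_cons (by omega)]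
      congr 2
      omega
    have htake : b.toList.take (k + 1) = b.toList.take k ++ [b.toList[k]'(by omega)] := by
      rw [List.take_add_one, List.getElem?_eq_getElem (by omega)]
      rfl
    have hha : ((PySem.Str.pyGet? a (PySem.Str.len a - ((k : Int) + 1))).elim 0
          (fun c => (c.toNat : Int))
            + 2097152 * pvEncodeM (a.toList.drop (a.toList.length - k)))
          % 2305843009213693951
        = pvEncodeM (a.toList.drop (a.toList.length - (k + 1))) := by
      rw [hga, hdrop]
      rfl
    have hhb : (pvEncode (b.toList.take k) % 2305843009213693951
          + (PySem.Str.pyGet? b ((k : Int) + 1 - 1)).elim 0 (fun c => (c.toNat : Int))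
            * (2097152 ^ k % 2305843009213693951)) % 2305843009213693951
        = pvEncode (b.toList.take (k + 1)) % 2305843009213693951 := by
      rw [hgb, htake, pvEncode_append_singleton, List.length_take, min_eq_left (by omega)]
      exact (pvModEq_self _ _).add ((Int.ModEq.refl _).mul (pvModEq_self _ _))
    have hpw : (2097152 : Int) ^ k % 2305843009213693951 * 2097152 % 2305843009213693951
        = (2097152 : Int) ^ (k + 1) % 2305843009213693951 := by
      rw [pow_succ]
      conv_lhs => rw [Int.mul_emod]
      rw [Int.emod_emod_of_dvd _ dvd_rfl, ← Int.mul_emod]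
    have hslA : PySem.Str.slice a (some (PySem.Str.len a - ((k : Int) + 1))) none
        = String.ofList (a.toList.drop (a.toList.length - (k + 1))) := by
      simp only [PySem.Str.slice, PySem.Chars.slice, PySem.Str.len_eq]
      rw [show ((a.toList.length : Int)) - ((k : Int) + 1)
            = ((a.toList.length - (k + 1) : Nat) : Int) by omega,
          PySem.List.slice_from_natCast]
    have hslB : PySem.Str.slice b none (some ((k : Int) + 1))
        = String.ofList (b.toList.take (k + 1)) := by
      rw [PySem.Str.slice, show ((k : Int) + 1) = ((k + 1 : Nat) : Int) by push_cast; ring]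
      rw [PySem.Chars.slice, PySem.List.slice_to_natCast]
    simp only [List.foldl_cons, List.foldl_nil, pvStepB]
    rw [hha, hhb, hpw, hslA, hslB]
    have hiff : (pvEncodeM (a.toList.drop (a.toList.length - (k + 1)))
            = pvEncode (b.toList.take (k + 1)) % 2305843009213693951
          ∧ String.ofList (a.toList.drop (a.toList.length - (k + 1)))
            = String.ofList (b.toList.take (k + 1)))
        ↔ (b.toList.take (k + 1) = a.toList.drop (a.toList.length - (k + 1))) := by
      constructor
      · rintro ⟨-, hs⟩
        have h := congrArg String.toList hs
        simp only [String.toList_ofList] at h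
        exact h.symm
      · intro h
        refine ⟨?_, ?_⟩
        · rw [pvEncodeM_eq, ← h]
        · rw [h]
    simp only [Prod.mk.injEq, true_and]
    simp only [pvF]
    by_cases hc : b.toList.take (k + 1) = a.toList.drop (a.toList.length - (k + 1))
    · rw [if_pos hc, if_pos (hiff.mpr hc)]
    · rw [if_neg hc, if_neg (fun h => hc (hiff.mp h))]

-- ===== VERDICT (by name: the statement is the Claim_ definition above) =====
theorem merge_with_recent_spec : Claim_equal_merge_with_recent := by
  intro recent_text new_text max_overlap _
  unfold Spec_merge_with_recent merge_with_recent merge_with_recent_alt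
  by_cases hb : PySem.Str.strip new_text = ""
  · simp [hb]
  · by_cases ha : PySem.Str.strip recent_text = ""
    · simp [hb, ha]
    · simp only [hb, ha, or_self, if_false]
      set a := PySem.Str.strip recent_text with hadef
      set b := PySem.Str.strip new_text with hbdef
      set K := min (min (PySem.Str.len a) (PySem.Str.len b)) max_overlap with hK
      have hov : pvFindOv_A a b (PySem.List.pyRange K 0 (-1))
          = ((PySem.List.pyRange 1 (K + 1) 1).foldl
              (pvStepB a b (PySem.Str.len a)) (0, 0, 1, 0)).2.2.2 := by
        by_cases hK0 : K ≤ 0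
        · rw [PySem.List.pyRange_neg_one_eq_nil (by omega),
              PySem.List.pyRange_one_eq_nil (by omega)]
          simp [pvFindOv_A]
        · have hKn : K ≤ (a.toList.length : Int) := by
            rw [← PySem.Str.len_eq]
            exact le_trans (min_le_left _ _) (min_le_left _ _)
          have hKm : K ≤ (b.toList.length : Int) := by
            rw [← PySem.Str.len_eq]
            exact le_trans (min_le_left _ _) (min_le_right _ _)
          rw [show K = ((K.toNat : Nat) : Int) by omega,
              pvA_loop a b K.toNat (by omega) (by omega),
              pvB_loop a b K.toNat (by omega) (by omega)]
      rw [hov]
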